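-- pv_equiv track=rewrite | github.com/cuddlefishez/teh-mad-mad-adventure | Mad_Adventure.py | hitdice
-- ===== SOURCE A (Python) =====
-- def hitdice(player_class):
-- #hit dice values for each class
-- 	hitdice = ''
-- 	d12 = ['Barbarian']
-- 	d10 = ['Cleric','Fighter','Paladin']
-- 	d8 = ['Bard','Druid','Rogue','Ranger','Warlock','Monk']
-- 	d6 = ['Wizard','Sorcerer']
-- 	dice = [d12,d10,d8,d6]
-- 	dicevalue = ['d 12','d 10','d 8','d 6']
-- 	k = 0
-- 	for hdice in dice:
-- 		if player_class in hdice: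
-- 			hitdice = dicevalue[k]
-- 			break
-- 		else:
-- 			k += 1
-- 	return(hitdice)
-- ===== SOURCE B (Python) =====
-- _HIT_DICE = {
--     'Barbarian': 'd 12',
--     'Cleric': 'd 10', 'Fighter': 'd 10', 'Paladin': 'd 10',
--     'Bard': 'd 8', 'Druid': 'd 8', 'Rogue': 'd 8', 'Ranger': 'd 8', 'Warlock': 'd 8', 'Monk': 'd 8',
--     'Wizard': 'd 6', 'Sorcerer': 'd 6',
-- }
--
-- def hitdice(player_class):
--     return _HIT_DICE.get(player_class, '')
-- ===== Notes on version B (the rewrite author's own statement) =====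
-- stated objective: idiomatic
-- what changed: Replaced the loop over dice buckets with a parallel index counter by a single flat dict lookup with an empty-string default for unknown classes.
import Mathlib
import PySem

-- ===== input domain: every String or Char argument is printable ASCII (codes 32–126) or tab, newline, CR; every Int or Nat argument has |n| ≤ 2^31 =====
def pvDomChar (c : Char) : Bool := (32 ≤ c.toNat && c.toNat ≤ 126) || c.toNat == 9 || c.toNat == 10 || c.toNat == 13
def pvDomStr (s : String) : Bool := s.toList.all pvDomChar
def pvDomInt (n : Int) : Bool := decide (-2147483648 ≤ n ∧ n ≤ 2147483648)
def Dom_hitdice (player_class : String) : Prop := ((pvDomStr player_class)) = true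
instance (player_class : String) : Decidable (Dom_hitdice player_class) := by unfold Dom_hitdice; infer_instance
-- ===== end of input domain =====

-- B replaces A's bucket-list scan with its index counter by a single flat dict lookup (idiomatic).


-- ===== PORT A =====
-- loop over the bucket lists, advancing k until a bucket contains player_class (break = return)
-- dicevalue[k] is always in range when read (k < dicevalue.length on every hit); pyGet? … getD "" is exact here
def hitdiceLoop (player_class : String) (dice : List (List String)) (dicevalue : List String)
    (hd : String) (k : Int) : String :=
  match dice with
  | [] => hd
  | hdice :: rest =>
    if player_class ∈ hdice then (PySem.List.pyGet? dicevalue k).getD ""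
    else hitdiceLoop player_class rest dicevalue hd (k + 1)

def hitdice (player_class : String) : String :=
  let d12 := ["Barbarian"]
  let d10 := ["Cleric", "Fighter", "Paladin"]
  let d8 := ["Bard", "Druid", "Rogue", "Ranger", "Warlock", "Monk"]
  let d6 := ["Wizard", "Sorcerer"]
  let dice := [d12, d10, d8, d6]
  let dicevalue := ["d 12", "d 10", "d 8", "d 6"]
  hitdiceLoop player_class dice dicevalue "" 0

-- ===== PORT B =====
def hitdiceTable : PySem.Dict String String :=
  PySem.Dict.ofList [("Barbarian", "d 12"),
    ("Cleric", "d 10"), ("Fighter", "d 10"), ("Paladin", "d 10"),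
    ("Bard", "d 8"), ("Druid", "d 8"), ("Rogue", "d 8"), ("Ranger", "d 8"), ("Warlock", "d 8"), ("Monk", "d 8"),
    ("Wizard", "d 6"), ("Sorcerer", "d 6")]

def hitdice_alt (player_class : String) : String :=
  PySem.Dict.getD hitdiceTable player_class ""

-- ===== PRECONDITION & SPEC =====
def Spec_hitdice (player_class : String) (out : String) : Prop := out = hitdice_alt player_class
instance (player_class : String) (out : String) : Decidable (Spec_hitdice player_class out) := by unfold Spec_hitdice; infer_instance

-- ===== CLAIM (what is proved, stated in full; the proofs are below) =====
def Claim_equal_hitdice : Prop := ∀ (player_class : String), Dom_hitdice player_class → Spec_hitdice player_class (hitdice player_class)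

-- ===== LEMMAS AND PROOFS =====

-- ===== VERDICT (by name: the statement is the Claim_ definition above) =====
theorem hitdice_spec : Claim_equal_hitdice := by
  intro pc _
  unfold Spec_hitdice
  by_cases h1 : pc = "Barbarian"; · subst h1; decide
  by_cases h2 : pc = "Cleric"; · subst h2; decide
  by_cases h3 : pc = "Fighter"; · subst h3; decide
  by_cases h4 : pc = "Paladin"; · subst h4; decide
  by_cases h5 : pc = "Bard"; · subst h5; decide
  by_cases h6 : pc = "Druid"; · subst h6; decide
  by_cases h7 : pc = "Rogue"; · subst h7; decide
  by_cases h8 : pc = "Ranger"; · subst h8; decide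
  by_cases h9 : pc = "Warlock"; · subst h9; decide
  by_cases h10 : pc = "Monk"; · subst h10; decide
  by_cases h11 : pc = "Wizard"; · subst h11; decide
  by_cases h12 : pc = "Sorcerer"; · subst h12; decide
  simp [hitdice, hitdice_alt, hitdiceLoop, hitdiceTable, PySem.Dict.ofList,
    PySem.Dict.update, List.foldl, PySem.Dict.getD_insert, PySem.Dict.getD_empty,
    h1, h2, h3, h4, h5, h6, h7, h8, h9, h10, h11, h12]
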